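-- pv_equiv track=rewrite | github.com/hduyanh/python-codes | tanulas/egyetemi_beadandok.py | fuggeszkedolista
-- ===== SOURCE A (Python) =====
-- def fuggeszkedolista(m):
--
--   def fuggeszkedo(n):
--     r = False
--     l1 = list(str(n))
--     l2 = [int(i) for i in l1]
--     if len(l2) >= 3 and l2[0] == l2[-1] and l2[0] > max(l2[1:-1]):
--       r = True
--     return r
--
--   l3 = [i for i in range(m + 1) if fuggeszkedo(i)]
--   return l3
-- ===== SOURCE B (Python) =====
-- def _hang(t, d):
--     # t = the digits of n above the last one (as a number, t >= 1), d = last digit: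
--     # every digit of t except its leading digit must be < d, and the leading digit must equal d.
--     if t < 10:
--         return t == d
--     return t % 10 < d and _hang(t // 10, d)
--
--
-- def fuggeszkedolista(m):
--     res = []
--     for n in range(m + 1):
--         body = n // 10
--         if body >= 10 and _hang(body, n % 10):
--             res.append(n)
--     return res
-- ===== Notes on version B (the rewrite author's own statement) =====
-- stated objective: faster
-- what changed: The string-based digit test (str(n), list of ints, slicing, max) is replaced by a pure-arithmetic divmod recursion that checks each higher digit against the last digit directly, with early exit on the first failing digit.
import Mathlib
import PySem

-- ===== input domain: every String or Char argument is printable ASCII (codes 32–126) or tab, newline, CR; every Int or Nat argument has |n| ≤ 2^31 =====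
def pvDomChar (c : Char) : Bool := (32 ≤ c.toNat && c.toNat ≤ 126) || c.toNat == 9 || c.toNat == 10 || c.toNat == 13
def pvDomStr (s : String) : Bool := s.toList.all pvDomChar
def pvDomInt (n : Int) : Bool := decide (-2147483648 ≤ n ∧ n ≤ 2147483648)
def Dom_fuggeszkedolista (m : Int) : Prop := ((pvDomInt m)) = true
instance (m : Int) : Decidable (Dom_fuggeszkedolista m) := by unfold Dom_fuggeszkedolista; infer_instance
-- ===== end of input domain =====

-- B replaces the string-based digit test (str(n), int list, slicing, max) by a pure-arithmetic
-- divmod recursion over the digits; objective: faster (constant factor, measured).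


-- ===== PORT A =====
-- inner helper 'fuggeszkedo(n)'; int(i) is ported as (ofChars? [i]).getD 0 — on the nonnegative
-- n this is applied to, every character is a decimal digit, so int() never raises; likewise the
-- defaults of pyGetD/max? are never used because Python's 'and' guards them with len >= 3.
def pvFuggeszkedo (n : Int) : Bool :=
  let l1 : List Char := PySem.Int.toChars n                                  -- list(str(n))
  let l2 : List Int := l1.map (fun i => (PySem.Int.ofChars? [i]).getD 0)     -- [int(i) for i in l1]
  if 3 ≤ l2.length ∧ PySem.List.pyGetD l2 0 0 = PySem.List.pyGetD l2 (-1) 0 ∧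
      (PySem.List.max? (PySem.List.slice l2 (some 1) (some (-1))) id).getD 0 < PySem.List.pyGetD l2 0 0
  then true else false

def fuggeszkedolista (m : Int) : List Int :=
  (PySem.List.pyRange 0 (m + 1) 1).filter (fun i => pvFuggeszkedo i)

-- ===== PORT B =====
-- _hang(t, d): every digit of t except its leading one must be < d, leading digit must equal d
def pvHang (t d : Int) : Bool :=
  if t < 10 then t == d
  else decide (PySem.Int.mod t 10 < d) && pvHang (PySem.Int.floordiv t 10) d
termination_by t.toNat
decreasing_by
  have h10 : PySem.Int.floordiv t 10 = t / 10 := PySem.Int.floordiv_eq_ediv_of_pos (by omega)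
  rename_i h; rw [h10]; omega

def fuggeszkedolista_alt (m : Int) : List Int :=
  (PySem.List.pyRange 0 (m + 1) 1).foldl
    (fun res n =>
      let body := PySem.Int.floordiv n 10
      if 10 ≤ body && pvHang body (PySem.Int.mod n 10) then res ++ [n] else res) []

-- ===== PRECONDITION & SPEC =====
def Spec_fuggeszkedolista (m : Int) (out : List Int) : Prop := out = fuggeszkedolista_alt m
instance (m : Int) (out : List Int) : Decidable (Spec_fuggeszkedolista m out) := by unfold Spec_fuggeszkedolista; infer_instance

-- ===== CLAIM (what is proved, stated in full; the proofs are below) =====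
def Claim_equal_fuggeszkedolista : Prop := ∀ (m : Int), Dom_fuggeszkedolista m → Spec_fuggeszkedolista m (fuggeszkedolista m)

-- ===== LEMMAS AND PROOFS =====

-- big-endian decimal digits of a natural number, as characters / as integers
def pvRepC (n : Nat) : List Char :=
  if _h : n < 10 then [Nat.digitChar n] else pvRepC (n / 10) ++ [Nat.digitChar (n % 10)]
decreasing_by exact Nat.div_lt_self (by omega) (by omega)

def pvRepI (n : Nat) : List Int :=
  if _h : n < 10 then [(n : Int)] else pvRepI (n / 10) ++ [((n % 10 : Nat) : Int)]
decreasing_by exact Nat.div_lt_self (by omega) (by omega)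

lemma pvToDigitsCore_eq (f : Nat) : ∀ (n : Nat) (acc : List Char), n < f →
    Nat.toDigitsCore 10 f n acc = pvRepC n ++ acc := by
  induction f with
  | zero => intro n acc h; omega
  | succ f ih =>
    intro n acc h
    rw [Nat.toDigitsCore]
    by_cases h10 : n / 10 = 0
    · have hn : n < 10 := by omega
      rw [pvRepC, dif_pos hn]
      simp [h10, Nat.mod_eq_of_lt hn]
    · have hn : ¬ n < 10 := by omega
      rw [if_neg h10, ih (n / 10) _ (by omega)]
      conv_rhs => rw [pvRepC]
      rw [dif_neg hn, List.append_assoc]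
      rfl

lemma pvToChars_natCast (n : Nat) : PySem.Int.toChars (n : Int) = pvRepC n := by
  have : ¬ ((n : Int) < 0) := by omega
  simp only [PySem.Int.toChars, if_neg this, Int.toNat_natCast, Nat.toDigits]
  simpa using pvToDigitsCore_eq (n + 1) n [] (by omega)

lemma pvMapInt_repC (n : Nat) : (pvRepC n).map (fun i => (PySem.Int.ofChars? [i]).getD 0) = pvRepI n := by
  have hd : ∀ d : Nat, d < 10 → (PySem.Int.ofChars? [Nat.digitChar d]).getD 0 = (d : Int) := by decide
  induction n using Nat.strong_induction_on with
  | _ n ih =>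
    by_cases h : n < 10
    · rw [pvRepC, dif_pos h, pvRepI, dif_pos h]; simp [hd n h]
    · rw [pvRepC, dif_neg h, pvRepI, dif_neg h, List.map_append,
        ih (n / 10) (Nat.div_lt_self (by omega) (by omega))]
      simp [hd (n % 10) (by omega)]

lemma pvRepI_ne_nil (n : Nat) : pvRepI n ≠ [] := by
  rw [pvRepI]; split <;> simp

lemma pvRepI_length_low (n : Nat) (h : n < 100) : (pvRepI n).length ≤ 2 := by
  rw [pvRepI]
  split
  · simp
  · rw [pvRepI, dif_pos (by omega : n / 10 < 10)]; simp

lemma pvRepI_length_high (n : Nat) (h : 100 ≤ n) : 3 ≤ (pvRepI n).length := by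
  rw [pvRepI, dif_neg (by omega : ¬ n < 10), pvRepI, dif_neg (by omega : ¬ n / 10 < 10)]
  have := List.length_pos_iff.mpr (pvRepI_ne_nil (n / 10 / 10))
  simp; omega

-- the middle slice l2[1:-1]
lemma pvSlice_middle (xs : List Int) : PySem.List.slice xs (some 1) (some (-1)) = xs.tail.dropLast := by
  cases xs with
  | nil => simp [PySem.List.slice]
  | cons a l =>
    simp [PySem.List.slice, PySem.List.clampIdx, List.dropLast_eq_take]
    split <;> omega

-- max of a nonempty list, as a universal bound
lemma pvMax_lt_iff (L : List Int) (hL : L ≠ []) (c : Int) :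
    (PySem.List.max? L id).getD 0 < c ↔ ∀ x ∈ L, x < c := by
  obtain ⟨m, hm⟩ : ∃ m, PySem.List.max? L id = some m := by
    cases hmax : PySem.List.max? L id with
    | none => exact absurd ((PySem.List.max?_eq_none_iff L id).mp hmax) hL
    | some m => exact ⟨m, rfl⟩
  have hmem := PySem.List.max?_mem hm
  have hbd := PySem.List.max?_isMax hm
  rw [hm]
  constructor
  · intro h x hx; exact lt_of_le_of_lt (hbd x hx) h
  · intro h; exact h m hmem

-- the structural condition A checks on the digit list, for the "body" b = n // 10
def pvQ (b : Nat) (d : Int) : Prop :=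
  (pvRepI b).getD 0 0 = d ∧ ∀ x ∈ (pvRepI b).tail, x < (pvRepI b).getD 0 0

lemma pvHang_natCast (b : Nat) (d : Int) : (pvHang (b : Int) d = true) ↔ pvQ b d := by
  induction b using Nat.strong_induction_on with
  | _ b ih =>
    by_cases h : b < 10
    · rw [pvHang, if_pos (by exact_mod_cast h), pvQ, pvRepI, dif_pos h]
      simp
    · have hb10 : ¬ ((b : Int) < 10) := by exact_mod_cast h
      have hdiv : PySem.Int.floordiv (b : Int) 10 = ((b / 10 : Nat) : Int) := by
        exact_mod_cast PySem.Int.floordiv_natCast b 10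
      have hmod : PySem.Int.mod (b : Int) 10 = ((b % 10 : Nat) : Int) := by
        exact_mod_cast PySem.Int.mod_natCast b 10
      rw [pvHang, if_neg hb10, hdiv, hmod]
      have hne := pvRepI_ne_nil (b / 10)
      have hgetD : (pvRepI b).getD 0 0 = (pvRepI (b / 10)).getD 0 0 := by
        rw [pvRepI, dif_neg h]
        cases hrep : pvRepI (b / 10) with
        | nil => exact absurd hrep hne
        | cons a l => simp
      have htail : (pvRepI b).tail = (pvRepI (b / 10)).tail ++ [((b % 10 : Nat) : Int)] := by
        rw [pvRepI, dif_neg h, List.tail_append]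
        simp [List.isEmpty_eq_false_iff.mpr hne]
      rw [Bool.and_eq_true, decide_eq_true_iff, ih (b / 10) (Nat.div_lt_self (by omega) (by omega))]
      unfold pvQ
      rw [hgetD, htail]
      constructor
      · rintro ⟨hlt, hhd, hall⟩
        refine ⟨hhd, fun x hx => ?_⟩
        rcases List.mem_append.mp hx with hx | hx
        · exact hall x hx
        · rw [List.mem_singleton] at hx
          rw [hx, hhd]; exact hlt
      · rintro ⟨hhd, hall⟩
        have h1 := hall _ (List.mem_append_right _ (List.mem_singleton_self _))
        rw [hhd] at h1
        exact ⟨h1, hhd, fun x hx => hall x (List.mem_append_left _ hx)⟩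

-- the key pointwise equivalence of the two digit tests, on nonnegative inputs
lemma pvKey (n : Nat) :
    pvFuggeszkedo (n : Int) =
      (10 ≤ PySem.Int.floordiv (n : Int) 10 && pvHang (PySem.Int.floordiv (n : Int) 10) (PySem.Int.mod (n : Int) 10)) := by
  have hdiv : PySem.Int.floordiv (n : Int) 10 = ((n / 10 : Nat) : Int) := by
    exact_mod_cast PySem.Int.floordiv_natCast n 10
  have hmod : PySem.Int.mod (n : Int) 10 = ((n % 10 : Nat) : Int) := by
    exact_mod_cast PySem.Int.mod_natCast n 10
  have hl2 : (PySem.Int.toChars (n : Int)).map (fun i => (PySem.Int.ofChars? [i]).getD 0) = pvRepI n := by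
    rw [pvToChars_natCast, pvMapInt_repC]
  rw [pvFuggeszkedo, hdiv, hmod]
  simp only [hl2]
  by_cases h100 : 100 ≤ n
  · -- n has at least 3 digits
    have hb : ¬ n / 10 < 10 := by omega
    have hbI : (10 : Int) ≤ ((n / 10 : Nat) : Int) := by exact_mod_cast Nat.not_lt.mp hb
    have hne := pvRepI_ne_nil (n / 10)
    have hsplit : pvRepI n = pvRepI (n / 10) ++ [((n % 10 : Nat) : Int)] := by
      rw [pvRepI, dif_neg (by omega : ¬ n < 10)]
    have hlast : PySem.List.pyGetD (pvRepI n) (-1) 0 = ((n % 10 : Nat) : Int) := by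
      rw [hsplit]; exact PySem.List.pyGetD_neg_one_append_singleton _ _ _
    have hhead : PySem.List.pyGetD (pvRepI n) 0 0 = (pvRepI (n / 10)).getD 0 0 := by
      rw [PySem.List.pyGetD_zero, hsplit]
      cases hrep : pvRepI (n / 10) with
      | nil => exact absurd hrep hne
      | cons a l => simp
    have htail' : (pvRepI (n / 10)).tail ≠ [] := by
      rw [pvRepI, dif_neg hb, List.tail_append]
      simp [List.isEmpty_eq_false_iff.mpr (pvRepI_ne_nil (n / 10 / 10))]
    have hmid : PySem.List.slice (pvRepI n) (some 1) (some (-1)) = (pvRepI (n / 10)).tail := by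
      rw [pvSlice_middle, hsplit, List.tail_append]
      simp [List.isEmpty_eq_false_iff.mpr hne]
    rw [hlast, hhead, hmid]
    have hq := pvHang_natCast (n / 10) ((n % 10 : Nat) : Int)
    by_cases hQ : pvQ (n / 10) ((n % 10 : Nat) : Int)
    · rw [if_pos ⟨pvRepI_length_high n h100, hQ.1, (pvMax_lt_iff _ htail' _).mpr hQ.2⟩,
        (Bool.and_eq_true _ _).mpr ⟨decide_eq_true hbI, hq.mpr hQ⟩]
    · have hpv : pvHang ((n / 10 : Nat) : Int) ((n % 10 : Nat) : Int) = false :=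
        Bool.eq_false_iff.mpr (fun hc => hQ (hq.mp hc))
      rw [if_neg, hpv, Bool.and_false]
      rintro ⟨-, hhd, hmax⟩
      exact hQ ⟨hhd, (pvMax_lt_iff _ htail' _).mp hmax⟩
  · -- fewer than 3 digits: both sides are false
    have hbI : ¬ (10 : Int) ≤ ((n / 10 : Nat) : Int) := by
      exact_mod_cast (by omega : ¬ 10 ≤ n / 10)
    have hlen := pvRepI_length_low n (by omega)
    rw [if_neg (by omega), decide_eq_false hbI, Bool.false_and]

-- ===== VERDICT (by name: the statement is the Claim_ definition above) =====
theorem fuggeszkedolista_spec : Claim_equal_fuggeszkedolista := by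
  intro m _
  unfold Spec_fuggeszkedolista
  have hB : fuggeszkedolista_alt m =
      (PySem.List.pyRange 0 (m + 1) 1).filter
        (fun n => 10 ≤ PySem.Int.floordiv n 10 && pvHang (PySem.Int.floordiv n 10) (PySem.Int.mod n 10)) := by
    have h := PySem.List.foldl_append_if
      (fun n : Int => 10 ≤ PySem.Int.floordiv n 10 && pvHang (PySem.Int.floordiv n 10) (PySem.Int.mod n 10))
      (fun n : Int => n) (PySem.List.pyRange 0 (m + 1) 1) []
    simpa [fuggeszkedolista_alt] using h
  rw [fuggeszkedolista, hB]
  refine List.filter_congr (fun x hx => ?_)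
  have hx0 : 0 ≤ x := (PySem.List.mem_pyRange_one.mp hx).1
  have hcast : x = ((x.toNat : Nat) : Int) := by omega
  rw [hcast, pvKey]
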